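-- pv_equiv track=rewrite | github.com/chenxuan929/CS5001 | final exam/exam2.py | is_ambigram
-- ===== SOURCE A (Python) =====
-- def is_ambigram(n:int):
--     if n < 0:
--         raise ValueError
--     n = list(str(n))
--     answer = 0
--     lst = ['1', '2', '5', '8', '0']
--     for each in n:
--         if each in lst:
--             answer += 1
--     if answer == len(n) and n == n[::-1]:
--         return True
--     else:
--         return False
-- ===== SOURCE B (Python) =====
-- def is_ambigram(n: int):
--     if n < 0:
--         raise ValueError
--     s = str(n)
--     while len(s) > 1:
--         if s[0] not in '01258' or s[0] != s[-1]:
--             return False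
--         s = s[1:-1]
--     return len(s) == 0 or s[0] in '01258'
-- ===== Notes on version B (the rewrite author's own statement) =====
-- stated objective: alternative
-- what changed: Replaces A's two separate passes (a full count of valid digits plus a full-reversal palindrome comparison) with a single shrink-from-both-ends loop that checks validity and the mirror match of each end pair at once.
import Mathlib
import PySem

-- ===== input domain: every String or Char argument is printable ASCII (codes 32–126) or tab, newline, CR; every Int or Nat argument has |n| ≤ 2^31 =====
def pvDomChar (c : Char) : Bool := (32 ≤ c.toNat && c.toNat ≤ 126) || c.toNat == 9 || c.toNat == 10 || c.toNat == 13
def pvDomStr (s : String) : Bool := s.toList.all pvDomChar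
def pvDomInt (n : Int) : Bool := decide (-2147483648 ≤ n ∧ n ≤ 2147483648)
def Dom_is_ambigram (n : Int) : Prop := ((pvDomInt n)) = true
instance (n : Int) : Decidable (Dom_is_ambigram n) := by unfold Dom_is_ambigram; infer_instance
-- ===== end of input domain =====

-- B shrinks the digit string from both ends in one loop instead of A's count pass plus reversal comparison.

-- ===== PORT A =====
def is_ambigram (n : Int) : Bool :=
  let s := (PySem.Int.toStr n).toList
  let lst : List Char := ['1', '2', '5', '8', '0']
  let answer : Int := s.foldl (fun acc each => if each ∈ lst then acc + 1 else acc) 0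
  if answer = (s.length : Int) ∧ s = s.reverse then true else false

-- ===== PORT B =====
-- the test 's[0] in "01258"'
def pvValid (c : Char) : Bool := c ∈ ['0', '1', '2', '5', '8']

-- the 'while len(s) > 1: … s = s[1:-1]' loop of Source B together with its final
-- 'return len(s) == 0 or s[0] in "01258"' (the [] and [c] branches)
def pvShrink : List Char → Bool
  | [] => true
  | [c] => pvValid c
  | c :: d :: rest =>
      if pvValid c && (c == (d :: rest).getLast (by simp)) then pvShrink ((d :: rest).dropLast)
      else false
termination_by s => s.length
decreasing_by simp

def is_ambigram_alt (n : Int) : Bool :=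
  pvShrink ((PySem.Int.toStr n).toList)

-- ===== PRECONDITION & SPEC =====
-- A raises ValueError for n < 0 (and so does B); Pre_ excludes exactly those inputs.
def Pre_is_ambigram (n : Int) : Prop := 0 ≤ n
instance (n : Int) : Decidable (Pre_is_ambigram n) := by unfold Pre_is_ambigram; infer_instance
def pvWitness_is_ambigram : Int := (121)

def Spec_is_ambigram (n : Int) (out : Bool) : Prop := out = is_ambigram_alt n
instance (n : Int) (out : Bool) : Decidable (Spec_is_ambigram n out) := by unfold Spec_is_ambigram; infer_instance

-- ===== CLAIM (what is proved, stated in full; the proofs are below) =====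
def Claim_equal_is_ambigram : Prop := ∀ (n : Int), Dom_is_ambigram n → Pre_is_ambigram n → Spec_is_ambigram n (is_ambigram n)

-- ===== LEMMAS AND PROOFS =====

-- one step of the shrink loop, seen from both ends of the list
theorem pvShrink_step (a b : Char) (l : List Char) :
    pvShrink (a :: (l ++ [b])) = if pvValid a && (a == b) then pvShrink l else false := by
  cases l with
  | nil => simp [pvShrink]
  | cons x xs =>
      have h : (x :: (xs ++ [b])).dropLast = x :: xs := by
        rw [← List.cons_append]; exact List.dropLast_concat ..
      simp [pvShrink, h]

-- the shrink loop succeeds exactly on palindromes made of valid digits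
theorem pvShrink_iff (s : List Char) :
    pvShrink s = true ↔ ((∀ c ∈ s, pvValid c = true) ∧ s = s.reverse) := by
  induction s using List.bidirectionalRec with
  | nil => simp [pvShrink]
  | singleton c => simp [pvShrink]
  | cons_append a l b ih =>
      rw [pvShrink_step]
      constructor
      · intro h
        split_ifs at h with hc
        · obtain ⟨hv, hab⟩ := Bool.and_eq_true_iff.mp hc
          have hab' : a = b := by simpa using hab
          obtain ⟨hall, hrev⟩ := ih.mp h
          subst hab'
          refine ⟨?_, by simp [← hrev]⟩
          intro c hc'
          rcases List.mem_cons.mp hc' with h1 | h2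
          · subst h1; exact hv
          · rcases List.mem_append.mp h2 with h3 | h4
            · exact hall c h3
            · simp only [List.mem_singleton] at h4; subst h4; exact hv
      · rintro ⟨hall, hrev⟩
        have hva : pvValid a = true := hall a (by simp)
        have hrev' : a :: (l ++ [b]) = b :: (l.reverse ++ [a]) := by
          simpa using hrev
        have hab : a = b := (List.cons.injEq _ _ _ _ ▸ hrev').1
        have htail : l ++ [b] = l.reverse ++ [a] := (List.cons.injEq _ _ _ _ ▸ hrev').2
        have hl : l = l.reverse := (List.append_left_injective [b]) (hab ▸ htail)
        rw [hva, hab, BEq.rfl, Bool.and_true, if_pos rfl]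
        exact ih.mpr ⟨fun c hc' => hall c (by simp [hc']), hl⟩

-- A's membership list and B's valid-digit test agree
theorem pv_mem (c : Char) :
    (decide (c ∈ (['1', '2', '5', '8', '0'] : List Char)) = true) ↔ pvValid c = true := by
  simp [pvValid]; tauto

-- A's whole body equals B's shrink loop, over an arbitrary digit string
theorem pvKey (s : List Char) :
    (if (s.foldl (fun acc each => if each ∈ (['1', '2', '5', '8', '0'] : List Char) then acc + 1 else acc) (0 : Int))
        = (s.length : Int) ∧ s = s.reverse then true else false) = pvShrink s := by
  rw [PySem.List.foldl_ite_add_one (fun c => c ∈ (['1', '2', '5', '8', '0'] : List Char)) s 0]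
  have hcnt : ((0 : Int) + (s.countP (fun c => decide (c ∈ (['1', '2', '5', '8', '0'] : List Char))) : Int)
      = (s.length : Int)) ↔ (∀ c ∈ s, pvValid c = true) := by
    rw [zero_add, Nat.cast_inj, List.countP_eq_length]
    exact ⟨fun h c hc => (pv_mem c).mp (h c hc), fun h c hc => (pv_mem c).mpr (h c hc)⟩
  split_ifs with h
  · exact ((pvShrink_iff s).mpr ⟨hcnt.mp h.1, h.2⟩).symm
  · rcases Bool.eq_false_or_eq_true (pvShrink s) with ht | hf
    · exact absurd ⟨hcnt.mpr ((pvShrink_iff s).mp ht).1, ((pvShrink_iff s).mp ht).2⟩ h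
    · exact hf.symm

-- ===== VERDICT (by name: the statement is the Claim_ definition above) =====
theorem is_ambigram_spec : Claim_equal_is_ambigram := by
  intro n _ _
  show is_ambigram n = is_ambigram_alt n
  have hA : is_ambigram n =
      (if ((PySem.Int.toStr n).toList.foldl
            (fun acc each => if each ∈ (['1', '2', '5', '8', '0'] : List Char) then acc + 1 else acc) (0 : Int))
          = ((PySem.Int.toStr n).toList.length : Int)
          ∧ (PySem.Int.toStr n).toList = (PySem.Int.toStr n).toList.reverse then true else false) := rfl
  rw [hA, pvKey]
  rfl
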